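-- pv_equiv track=rewrite | github.com/huellasenarena/qmp | scripts/qcommon.py | normalize_text_for_hash
-- ===== SOURCE A (Python) =====
-- def normalize_text_for_hash(s: str) -> str:
--     s = s.replace("\r\n", "\n").replace("\r", "\n")
--     lines = [ln.rstrip() for ln in s.split("\n")]
--     while lines and lines[0].strip() == "":
--         lines.pop(0)
--     while lines and lines[-1].strip() == "":
--         lines.pop()
--     return "\n".join(lines)
-- ===== SOURCE B (Python) =====
-- def normalize_text_for_hash(s: str) -> str:
--     s = s.replace("\r\n", "\n").replace("\r", "\n")
--     return "\n".join(ln.rstrip() for ln in s.split("\n")).strip("\n")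
-- ===== Notes on version B (the rewrite author's own statement) =====
-- stated objective: simpler
-- what changed: Replaces the two while-pop edge-trimming loops over the line list with a single strip of newline characters on the joined string: after per-line rstrip a blank edge line is exactly the empty string, so edge blanks become edge newline separators of the join and one strip removes them.
import Mathlib
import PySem

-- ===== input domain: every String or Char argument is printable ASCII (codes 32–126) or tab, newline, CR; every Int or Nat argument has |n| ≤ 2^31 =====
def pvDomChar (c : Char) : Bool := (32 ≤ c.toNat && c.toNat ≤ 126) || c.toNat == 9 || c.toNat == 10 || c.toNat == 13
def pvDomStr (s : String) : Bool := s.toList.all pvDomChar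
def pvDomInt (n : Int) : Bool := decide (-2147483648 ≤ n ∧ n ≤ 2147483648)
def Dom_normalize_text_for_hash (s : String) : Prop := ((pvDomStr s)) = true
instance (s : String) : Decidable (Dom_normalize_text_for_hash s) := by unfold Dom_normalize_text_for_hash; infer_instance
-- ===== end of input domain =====

-- B replaces A's two while-pop edge-trimming loops by one strip('\n') on the joined string (simpler decomposition; return value only, A mutates no argument).

-- ===== PORT A =====
-- while lines and lines[0].strip() == "": lines.pop(0)
def pvDropLeadA : List String → List String
  | [] => []
  | l :: ls => if PySem.Str.strip l == "" then pvDropLeadA ls else l :: ls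

-- while lines and lines[-1].strip() == "": lines.pop()
def pvDropTrailA (ls : List String) : List String :=
  match h : ls.getLast? with
  | none => ls
  | some l =>
    if PySem.Str.strip l == "" then pvDropTrailA ls.dropLast else ls
termination_by ls.length
decreasing_by
  have hne : ls ≠ [] := by intro e; subst e; simp at h
  have : 0 < ls.length := List.length_pos_iff.mpr hne
  simp [List.length_dropLast]; omega

def normalize_text_for_hash (s : String) : String :=
  let s1 := PySem.Str.replace (PySem.Str.replace s "\r\n" "\n") "\r" "\n"
  let lines := ((PySem.Str.split? s1 "\n").getD []).map PySem.Str.rstrip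
  PySem.Str.join "\n" (pvDropTrailA (pvDropLeadA lines))

-- ===== PORT B =====
def normalize_text_for_hash_alt (s : String) : String :=
  let s1 := PySem.Str.replace (PySem.Str.replace s "\r\n" "\n") "\r" "\n"
  let lines := ((PySem.Str.split? s1 "\n").getD []).map PySem.Str.rstrip
  PySem.Str.stripChars (PySem.Str.join "\n" lines) "\n"

-- ===== PRECONDITION & SPEC =====
def Spec_normalize_text_for_hash (s : String) (out : String) : Prop := out = normalize_text_for_hash_alt s
instance (s : String) (out : String) : Decidable (Spec_normalize_text_for_hash s out) := by unfold Spec_normalize_text_for_hash; infer_instance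

-- ===== CLAIM (what is proved, stated in full; the proofs are below) =====
def Claim_equal_normalize_text_for_hash : Prop := ∀ (s : String), Dom_normalize_text_for_hash s → Spec_normalize_text_for_hash s (normalize_text_for_hash s)

-- ===== LEMMAS AND PROOFS =====

theorem pv_splitOn_go_eq (fuel : Nat) (l cur : List Char) (acc : List (List Char)) (h : l.length < fuel) :
    PySem.Chars.splitOn.go ['\n'] fuel l cur acc
      = acc.reverse ++ (List.splitOnP (fun c => c == '\n') l).modifyHead (cur.reverse ++ ·) := by
  induction fuel generalizing l cur acc with
  | zero => omega
  | succ n ih =>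
    cases l with
    | nil =>
      simp [PySem.Chars.splitOn.go, List.splitOnP_nil]
    | cons c rest =>
      rw [PySem.Chars.splitOn.go]
      by_cases hc : c = '\n'
      · subst hc
        have hpre : (['\n'] : List Char).isPrefixOf ('\n' :: rest) = true := by
          simp [List.isPrefixOf]
        simp only [hpre, if_true, List.length_cons, List.length_singleton, List.drop_succ_cons,
          List.length_nil, List.drop_zero]
        rw [ih rest [] (cur.reverse :: acc) (by simp at h; omega)]
        simp only [List.splitOnP_cons, beq_self_eq_true, if_true, List.modifyHead_cons,
          List.reverse_cons, List.reverse_nil, List.nil_append, List.append_assoc,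
          List.cons_append, List.singleton_append]
        have hid : (fun x : List Char => x) = id := rfl
        rw [hid, List.modifyHead_id]
        simp
      · have hpre : (['\n'] : List Char).isPrefixOf (c :: rest) = false := by
          simp [List.isPrefixOf]; exact fun e => hc e.symm
        simp only [hpre, Bool.false_eq_true, if_false]
        rw [ih rest (c :: cur) acc (by simp at h ⊢; omega)]
        simp only [List.splitOnP_cons, hc, beq_iff_eq, if_false, List.modifyHead_modifyHead]
        have he : (fun x : List Char => (c :: cur).reverse ++ x)
            = ((fun x => cur.reverse ++ x) ∘ List.cons c) := by
          funext x; simp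
        rw [he]

theorem pv_splitOn_eq (l : List Char) :
    PySem.Chars.splitOn l ['\n'] = List.splitOnP (fun c => c == '\n') l := by
  unfold PySem.Chars.splitOn
  rw [pv_splitOn_go_eq (l.length + 1) l [] [] (Nat.lt_succ_self _)]
  have hid : (fun x : List Char => List.reverse [] ++ x) = id := by funext x; simp
  rw [hid, List.modifyHead_id]
  simp

theorem pv_mem_splitOnP_no_nl (l : List Char) (m : List Char)
    (hm : m ∈ List.splitOnP (fun c => c == '\n') l) : '\n' ∉ m := by
  induction l generalizing m with
  | nil => simp [List.splitOnP_nil] at hm; simp [hm]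
  | cons c rest ih =>
    rw [List.splitOnP_cons] at hm
    by_cases hc : c = '\n'
    · simp [hc] at hm
      rcases hm with h1 | h1
      · simp [h1]
      · exact ih m h1
    · simp [hc] at hm
      rcases h : List.splitOnP (fun c => c == '\n') rest with _ | ⟨a, as⟩
      · rw [h] at hm; simp at hm
      · rw [h] at hm
        simp [List.modifyHead_cons] at hm
        rcases hm with h1 | h1
        · subst h1
          intro hmem
          rcases List.mem_cons.mp hmem with h2 | h2
          · exact hc h2.symm
          · exact ih a (by rw [h]; exact List.mem_cons_self ..) h2
        · exact ih m (by rw [h]; exact List.mem_cons_of_mem _ h1)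

theorem pv_rstrip_subset (x : List Char) (c : Char) (hc : c ∈ PySem.Chars.rstrip x) : c ∈ x := by
  simp only [PySem.Chars.rstrip, List.mem_reverse] at hc
  have := (List.dropWhile_sublist PySem.Chars.isspace (l := x.reverse)).subset hc
  simpa using this

theorem pv_rstrip_eq_nil_iff (y : List Char) :
    PySem.Chars.rstrip y = [] ↔ ∀ c ∈ y, PySem.Chars.isspace c = true := by
  simp [PySem.Chars.rstrip, List.dropWhile_eq_nil_iff]

theorem pv_strip_rstrip_nil_iff (x : List Char) :
    PySem.Chars.strip (PySem.Chars.rstrip x) = [] ↔ PySem.Chars.rstrip x = [] := by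
  constructor
  · intro hs
    by_contra hne
    -- rstrip x = (dropWhile isspace x.reverse).reverse, nonempty, last char non-space
    set d := List.dropWhile PySem.Chars.isspace x.reverse with hd
    have hdne : d ≠ [] := by
      intro e
      exact hne (by simp [PySem.Chars.rstrip, ← hd, e])
    have hhead : PySem.Chars.isspace (d.head hdne) = false := List.head_dropWhile_not _ hdne
    set m := PySem.Chars.rstrip x with hm
    have hmd : m = d.reverse := by simp [hm, PySem.Chars.rstrip, hd]
    have hlast : m.getLast? = some (d.head hdne) := by
      rw [hmd]
      rw [List.getLast?_reverse]
      exact List.head?_eq_head hdne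
    -- strip m = rstrip (lstrip m)
    have hstrip : PySem.Chars.strip m = PySem.Chars.rstrip (PySem.Chars.lstrip m) := rfl
    rw [hstrip, pv_rstrip_eq_nil_iff] at hs
    -- lstrip m is a nonempty suffix of m, with same getLast?
    have hsuf : PySem.Chars.lstrip m <:+ m := List.dropWhile_suffix _
    have hlne : PySem.Chars.lstrip m ≠ [] := by
      intro e
      have hall : ∀ c ∈ m, PySem.Chars.isspace c = true :=
        List.dropWhile_eq_nil_iff.mp e
      have hmem : d.head hdne ∈ m := by
        rw [hmd]; simpa using List.head_mem hdne
      rw [hall _ hmem] at hhead; simp at hhead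
    obtain ⟨w, hw⟩ := hsuf
    have hlast2 : (PySem.Chars.lstrip m).getLast? = m.getLast? := by
      conv_rhs => rw [← hw]
      exact (List.getLast?_append_of_ne_nil _ hlne).symm
    have hmem2 : d.head hdne ∈ PySem.Chars.lstrip m :=
      List.mem_of_getLast? (hlast2.trans hlast)
    rw [hs _ hmem2] at hhead; simp at hhead
  · intro h; rw [h]; rfl

theorem pv_dropWhile_join (M : List (List Char)) (h : ∀ m ∈ M, '\n' ∉ m) :
    List.dropWhile (fun c => c == '\n') (PySem.Chars.join ['\n'] M)
      = PySem.Chars.join ['\n'] (List.dropWhile List.isEmpty M) := by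
  induction M with
  | nil => simp [PySem.Chars.join_nil]
  | cons a M ih =>
    cases M with
    | nil =>
      cases a with
      | nil => simp [PySem.Chars.join_singleton, PySem.Chars.join_nil]
      | cons c t =>
        have hc : c ≠ '\n' := by
          intro e; exact h (c :: t) (by simp) (by simp [e])
        simp [PySem.Chars.join_singleton, List.dropWhile_cons, hc]
    | cons b M' =>
      have h' : ∀ m ∈ b :: M', '\n' ∉ m := fun m hm => h m (List.mem_cons_of_mem _ hm)
      rw [PySem.Chars.join_cons_cons]
      cases a with
      | nil =>
        simp only [List.nil_append, List.singleton_append, List.dropWhile_cons, beq_self_eq_true,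
          if_true, List.isEmpty_nil]
        rw [ih h', List.dropWhile_cons]
      | cons c t =>
        have hc : c ≠ '\n' := by
          intro e; exact h (c :: t) (by simp) (by simp [e])
        simp [hc, PySem.Chars.join_cons_cons]

theorem pv_join_snoc (X : List (List Char)) (y : List Char) (h : X ≠ []) :
    PySem.Chars.join ['\n'] (X ++ [y]) = PySem.Chars.join ['\n'] X ++ '\n' :: y := by
  induction X with
  | nil => simp at h
  | cons a X ih =>
    cases X with
    | nil => simp [PySem.Chars.join_cons_cons, PySem.Chars.join_singleton]
    | cons b X' =>
      have ih' := ih (by simp)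
      simp only [List.cons_append] at ih' ⊢
      rw [PySem.Chars.join_cons_cons, PySem.Chars.join_cons_cons, ih']
      simp

theorem pv_join_reverse (M : List (List Char)) :
    (PySem.Chars.join ['\n'] M).reverse = PySem.Chars.join ['\n'] ((M.map List.reverse).reverse) := by
  induction M with
  | nil => simp [PySem.Chars.join_nil]
  | cons a M ih =>
    cases M with
    | nil => simp [PySem.Chars.join_singleton]
    | cons b M' =>
      rw [PySem.Chars.join_cons_cons, List.map_cons, List.reverse_cons]
      rw [pv_join_snoc _ _ (by simp)]
      rw [← ih]
      simp [List.reverse_append]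

theorem pv_mem_dropLeadA (L : List String) (m : String) (hm : m ∈ pvDropLeadA L) : m ∈ L := by
  induction L with
  | nil => simp [pvDropLeadA] at hm
  | cons l ls ih =>
    rw [pvDropLeadA] at hm
    by_cases hc : (PySem.Str.strip l == "") = true
    · rw [if_pos hc] at hm
      exact List.mem_cons_of_mem _ (ih hm)
    · rw [if_neg hc] at hm
      exact hm

theorem pv_blank_iff (l : String) (hl : PySem.Chars.strip l.toList = [] ↔ l.toList = []) :
    (PySem.Str.strip l == "") = l.toList.isEmpty := by
  by_cases h2 : l.toList = []
  · have hs : PySem.Str.strip l = "" := by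
      rw [← String.toList_inj, PySem.Str.toList_strip, hl.mpr h2]
      rfl
    simp [hs, h2]
  · have hs : PySem.Str.strip l ≠ "" := by
      intro e
      have : (PySem.Str.strip l).toList = [] := by rw [e]; rfl
      rw [PySem.Str.toList_strip] at this
      exact h2 (hl.mp this)
    have hb : (PySem.Str.strip l == "") = false := by simpa using hs
    rw [hb]
    exact (List.isEmpty_eq_false_iff.mpr h2).symm

theorem pv_dropLeadA_toList (L : List String)
    (h : ∀ m ∈ L, PySem.Chars.strip m.toList = [] ↔ m.toList = []) :
    (pvDropLeadA L).map String.toList = List.dropWhile List.isEmpty (L.map String.toList) := by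
  induction L with
  | nil => rfl
  | cons l ls ih =>
    rw [pvDropLeadA, List.map_cons, List.dropWhile_cons,
      ← pv_blank_iff l (h l (List.mem_cons_self ..))]
    by_cases hc : (PySem.Str.strip l == "") = true
    · rw [if_pos hc, if_pos hc]
      exact ih (fun m hm => h m (List.mem_cons_of_mem _ hm))
    · rw [if_neg hc, if_neg hc, List.map_cons]

theorem pv_dropTrailA_toList (L : List String)
    (h : ∀ m ∈ L, PySem.Chars.strip m.toList = [] ↔ m.toList = []) :
    (pvDropTrailA L).map String.toList
      = (List.dropWhile List.isEmpty ((L.map String.toList).reverse)).reverse := by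
  fun_induction pvDropTrailA L with
  | case1 L hnone =>
    have : L = [] := List.getLast?_eq_none_iff.mp hnone
    subst this; rfl
  | case2 L l hlast hc ih =>
    have hne : L ≠ [] := by intro e; subst e; simp at hlast
    have hl : L.getLast hne = l := by
      have := List.getLast?_eq_some_getLast (l := L) hne
      rw [hlast] at this; exact (Option.some_inj.mp this).symm
    have hmem : l ∈ L := by rw [← hl]; exact List.getLast_mem hne
    conv_rhs => rw [← List.dropLast_append_getLast hne, hl]
    rw [List.map_append, List.reverse_append]
    simp only [List.map_cons, List.map_nil, List.reverse_cons, List.reverse_nil, List.nil_append,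
      List.singleton_append, List.dropWhile_cons]
    have hb : l.toList.isEmpty = true := by
      rw [← pv_blank_iff l (h l hmem)]; exact hc
    rw [if_pos hb]
    exact ih (fun m hm => h m ((List.dropLast_sublist L).subset hm))
  | case3 L l hlast hc =>
    have hne : L ≠ [] := by intro e; subst e; simp at hlast
    have hl : L.getLast hne = l := by
      have := List.getLast?_eq_some_getLast (l := L) hne
      rw [hlast] at this; exact (Option.some_inj.mp this).symm
    have hmem : l ∈ L := by rw [← hl]; exact List.getLast_mem hne
    have hb : l.toList.isEmpty = false := by
      rw [← pv_blank_iff l (h l hmem)]; simpa using hc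
    conv_rhs => rw [← List.dropLast_append_getLast hne, hl]
    rw [List.map_append, List.reverse_append]
    simp only [List.map_cons, List.map_nil, List.reverse_cons, List.reverse_nil, List.nil_append,
      List.singleton_append, List.dropWhile_cons, hb]
    simp only [Bool.false_eq_true, if_false, List.reverse_cons, List.reverse_reverse]
    conv_lhs => rw [← List.dropLast_append_getLast hne, hl]
    simp

theorem pv_main (L : List String)
    (hnl : ∀ m ∈ L, '\n' ∉ m.toList)
    (hb : ∀ m ∈ L, PySem.Chars.strip m.toList = [] ↔ m.toList = []) :
    PySem.Str.join "\n" (pvDropTrailA (pvDropLeadA L))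
      = PySem.Str.stripChars (PySem.Str.join "\n" L) "\n" := by
  have hsep : ("\n" : String).toList = ['\n'] := rfl
  rw [← String.toList_inj, PySem.Str.toList_join, PySem.Str.toList_stripChars,
    PySem.Str.toList_join, hsep]
  set N : List (List Char) := L.map String.toList with hN
  have hnl' : ∀ m ∈ N, '\n' ∉ m := by
    intro m hm
    obtain ⟨u, hu, rfl⟩ := List.mem_map.mp hm
    exact hnl u hu
  have hb' : ∀ m ∈ pvDropLeadA L, PySem.Chars.strip m.toList = [] ↔ m.toList = [] :=
    fun m hm => hb m (pv_mem_dropLeadA L m hm)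
  rw [pv_dropTrailA_toList _ hb', pv_dropLeadA_toList _ hb, ← hN]
  -- B side: unfold stripChars and normalize its predicate to (· == '\n')
  show _ = PySem.Chars.stripChars (PySem.Chars.join ['\n'] N) ['\n']
  have hp : (fun c => (['\n'] : List Char).contains c) = (fun c : Char => c == '\n') := by
    funext c
    by_cases hc : c = '\n' <;> simp [hc]
  rw [PySem.Chars.stripChars]
  simp only [hp]
  set N1 : List (List Char) := List.dropWhile List.isEmpty N with hN1
  have hN1nl : ∀ m ∈ N1, '\n' ∉ m := fun m hm =>
    hnl' m ((List.dropWhile_sublist _).subset hm)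
  rw [pv_dropWhile_join N hnl', ← hN1, pv_join_reverse N1]
  have hrevnl : ∀ m ∈ (N1.map List.reverse).reverse, '\n' ∉ m := by
    intro m hm
    rw [List.mem_reverse] at hm
    obtain ⟨u, hu, rfl⟩ := List.mem_map.mp hm
    simpa using hN1nl u hu
  rw [pv_dropWhile_join _ hrevnl]
  rw [← List.map_reverse, List.dropWhile_map]
  have hie : (List.isEmpty ∘ List.reverse : List Char → Bool) = List.isEmpty := by
    funext x; simp
  rw [hie, pv_join_reverse, List.map_map]
  have hrr : (List.reverse ∘ List.reverse : List Char → List Char) = id := by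
    funext x; simp
  rw [hrr, List.map_id]

-- ===== VERDICT (by name: the statement is the Claim_ definition above) =====
theorem normalize_text_for_hash_spec : Claim_equal_normalize_text_for_hash := by
  intro s _
  unfold Spec_normalize_text_for_hash normalize_text_for_hash normalize_text_for_hash_alt
  apply pv_main
  all_goals
    intro m hm
    simp only [PySem.Str.split?, PySem.Chars.split?, show ("\n" : String).toList = ['\n'] from rfl,
      List.isEmpty_cons, Bool.false_eq_true, if_false, Option.map_some, Option.getD_some,
      List.map_map, List.mem_map] at hm
    obtain ⟨u, hu, rfl⟩ := hm
    rw [pv_splitOn_eq] at hu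
    simp only [Function.comp_apply, PySem.Str.toList_rstrip, String.toList_ofList]
  · exact fun hmem => pv_mem_splitOnP_no_nl _ u hu (pv_rstrip_subset _ _ hmem)
  · exact pv_strip_rstrip_nil_iff u
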